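-- pv_equiv track=rewrite | github.com/DannyRavi/delogger | ForDebudLibrary.py | CreateFlag
-- ===== SOURCE A (Python) =====
-- def CreateFlag(dataIn):
--     togg1 = False
--     togg2 = True
--     togg3 = True
--     Change = []
--     for i in range(len(dataIn)-1):
--         StChange = abs(dataIn[i] - dataIn[i+1])
--         if StChange == 1 :
--             togg1 ^= True
--         if togg1 == True and togg2:
--             Change.append(1)
--             togg2 = False
--             togg3 = True
--         if(togg1 == False and togg3):
--             togg2 = True
--             togg3 = False
--             Change.append(0)
--     return Change
-- ===== SOURCE B (Python) =====
-- def CreateFlag(dataIn):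
--     # Pass 1: cumulative parity (1/0) of adjacent differences equal to 1.
--     parities = []
--     p = 0
--     for i in range(len(dataIn) - 1):
--         if abs(dataIn[i] - dataIn[i + 1]) == 1:
--             p = 1 - p
--         parities.append(p)
--     # Pass 2: compress consecutive duplicates (first element always kept).
--     out = []
--     for p in parities:
--         if not out or out[-1] != p:
--             out.append(p)
--     return out
-- ===== Notes on version B (the rewrite author's own statement) =====
-- stated objective: simpler
-- what changed: A's fused loop with three interacting toggle booleans is replaced by two plain passes: build the list of cumulative parities of adjacent differences equal to 1, then compress consecutive duplicates against the last emitted element.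
import Mathlib
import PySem

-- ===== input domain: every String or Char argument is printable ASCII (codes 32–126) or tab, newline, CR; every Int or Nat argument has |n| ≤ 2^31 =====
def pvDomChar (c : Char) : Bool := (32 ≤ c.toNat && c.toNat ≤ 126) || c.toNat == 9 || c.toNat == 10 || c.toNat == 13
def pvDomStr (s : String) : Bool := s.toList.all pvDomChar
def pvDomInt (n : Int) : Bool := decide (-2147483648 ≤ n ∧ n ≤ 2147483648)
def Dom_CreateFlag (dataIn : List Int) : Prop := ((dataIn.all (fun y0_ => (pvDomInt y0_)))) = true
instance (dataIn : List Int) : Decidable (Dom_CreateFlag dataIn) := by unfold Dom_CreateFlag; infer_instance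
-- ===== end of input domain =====

-- B replaces A's fused three-boolean state machine by two plain passes (build the parity
-- list, then compress consecutive duplicates); objective: simpler, same O(n) cost.

-- ===== PORT A =====
-- one iteration of A's loop body; indices i and i+1 are always in range for i in range(len-1),
-- so pyGetD with default 0 is exact here
def aStep (d : List Int) (s : Bool × Bool × Bool × List Int) (i : Int) : Bool × Bool × Bool × List Int :=
  let stChange : Int := |PySem.List.pyGetD d i 0 - PySem.List.pyGetD d (i + 1) 0|
  let t1 := if stChange = 1 then !s.1 else s.1
  let s2 := if t1 = true ∧ s.2.1 = true then (false, true, s.2.2.2 ++ [(1 : Int)])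
            else (s.2.1, s.2.2.1, s.2.2.2)
  let s3 := if t1 = false ∧ s2.2.1 = true then (true, false, s2.2.2 ++ [(0 : Int)])
            else (s2.1, s2.2.1, s2.2.2)
  (t1, s3)

def CreateFlag (dataIn : List Int) : List Int :=
  ((PySem.List.pyRange 0 ((dataIn.length : Int) - 1) 1).foldl (aStep dataIn)
    (false, true, true, [])).2.2.2

-- ===== PORT B =====
-- pass 1: cumulative parity after each adjacent pair (indices always in range, as above)
def bParStep (d : List Int) (s : Int × List Int) (i : Int) : Int × List Int :=
  let p := if |PySem.List.pyGetD d i 0 - PySem.List.pyGetD d (i + 1) 0| = 1 then 1 - s.1 else s.1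
  (p, s.2 ++ [p])

-- pass 2: `if not out or out[-1] != p: out.append(p)`
def bOutStep (out : List Int) (p : Int) : List Int :=
  if out.isEmpty = true ∨ PySem.List.pyGet? out (-1) ≠ some p then out ++ [p] else out

def CreateFlag_alt (dataIn : List Int) : List Int :=
  let parities := ((PySem.List.pyRange 0 ((dataIn.length : Int) - 1) 1).foldl (bParStep dataIn)
    (0, [])).2
  parities.foldl bOutStep []

-- ===== PRECONDITION & SPEC =====
def Spec_CreateFlag (dataIn : List Int) (out : List Int) : Prop := out = CreateFlag_alt dataIn
instance (dataIn : List Int) (out : List Int) : Decidable (Spec_CreateFlag dataIn out) := by unfold Spec_CreateFlag; infer_instance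

-- ===== CLAIM (what is proved, stated in full; the proofs are below) =====
def Claim_equal_CreateFlag : Prop := ∀ (dataIn : List Int), Dom_CreateFlag dataIn → Spec_CreateFlag dataIn (CreateFlag dataIn)

-- ===== LEMMAS AND PROOFS =====

def toI (b : Bool) : Int := if b then 1 else 0

-- the parity bit after each step, starting from parity t
def bsOf (d : List Int) (t : Bool) : List Int → List Bool
  | [] => []
  | i :: r => (if |PySem.List.pyGetD d i 0 - PySem.List.pyGetD d (i + 1) 0| = 1 then !t else t) :: bsOf d (if |PySem.List.pyGetD d i 0 - PySem.List.pyGetD d (i + 1) 0| = 1 then !t else t) r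

-- compress consecutive duplicates, previous value t (it is dropped if repeated)
def dedupFrom (t : Bool) : List Bool → List Bool
  | [] => []
  | b :: r => if b = t then dedupFrom t r else b :: dedupFrom b r

-- compress consecutive duplicates, first element always kept
def dedupInit : List Bool → List Bool
  | [] => []
  | b :: r => b :: dedupFrom b r

theorem aloop_from (d : List Int) (l : List Int) :
    ∀ (t : Bool) (acc : List Int),
      (l.foldl (aStep d) (t, !t, t, acc)).2.2.2 = acc ++ (dedupFrom t (bsOf d t l)).map toI := by
  induction l with
  | nil => intro t acc; simp [dedupFrom, bsOf]
  | cons i r ih =>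
    intro t acc
    by_cases hc : |PySem.List.pyGetD d i 0 - PySem.List.pyGetD d (i + 1) 0| = 1 <;> cases t <;>
      simp [List.foldl, aStep, bsOf, dedupFrom, hc, toI] <;>
      first
        | (have h := ih true (acc ++ [1]); simp only [Bool.not_true, Bool.not_false] at h; rw [h]; try simp)
        | (have h := ih false (acc ++ [0]); simp only [Bool.not_true, Bool.not_false] at h; rw [h]; try simp)
        | (have h := ih true acc; simp only [Bool.not_true, Bool.not_false] at h; rw [h])
        | (have h := ih false acc; simp only [Bool.not_true, Bool.not_false] at h; rw [h])

theorem aloop_init (d : List Int) (l : List Int) (t : Bool) (acc : List Int) :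
    (l.foldl (aStep d) (t, true, true, acc)).2.2.2 = acc ++ (dedupInit (bsOf d t l)).map toI := by
  cases l with
  | nil => simp [dedupInit, bsOf]
  | cons i r =>
    by_cases hc : |PySem.List.pyGetD d i 0 - PySem.List.pyGetD d (i + 1) 0| = 1 <;> cases t <;>
      simp [List.foldl, aStep, bsOf, dedupInit, dedupFrom, hc, toI] <;>
      first
        | (have h := aloop_from d r true (acc ++ [1]); simp only [Bool.not_true, Bool.not_false] at h; rw [h]; try simp)
        | (have h := aloop_from d r false (acc ++ [0]); simp only [Bool.not_true, Bool.not_false] at h; rw [h]; try simp)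

-- the final parity bit, to state the parity-pass invariant
def endT (d : List Int) (t : Bool) : List Int → Bool
  | [] => t
  | i :: r => endT d (if |PySem.List.pyGetD d i 0 - PySem.List.pyGetD d (i + 1) 0| = 1 then !t else t) r

theorem bpar_loop (d : List Int) (l : List Int) :
    ∀ (t : Bool) (ps : List Int),
      l.foldl (bParStep d) (toI t, ps) = (toI (endT d t l), ps ++ (bsOf d t l).map toI) := by
  induction l with
  | nil => intro t ps; simp [endT, bsOf]
  | cons i r ih =>
    intro t ps
    by_cases hc : |PySem.List.pyGetD d i 0 - PySem.List.pyGetD d (i + 1) 0| = 1 <;> cases t <;>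
      simp [List.foldl, bParStep, bsOf, endT, hc, toI] <;>
      first
        | (have h := ih true (ps ++ [1]); simp [toI] at h; rw [h]; try simp)
        | (have h := ih false (ps ++ [0]); simp [toI] at h; rw [h]; try simp)

theorem bout_from (bs : List Bool) :
    ∀ (t : Bool) (x : List Int),
      ((bs.map toI).foldl bOutStep (x ++ [toI t]))
        = (x ++ [toI t]) ++ (dedupFrom t bs).map toI := by
  induction bs with
  | nil => intro t x; simp [dedupFrom]
  | cons b r ih =>
    intro t x
    have hlast : PySem.List.pyGet? (x ++ [toI t]) (-1) = some (toI t) :=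
      PySem.List.pyGet?_neg_one_append_singleton x (toI t)
    by_cases hb : b = t
    · subst hb
      have hstep : bOutStep (x ++ [toI b]) (toI b) = x ++ [toI b] := by
        simp [bOutStep, hlast]
      simp only [List.map, List.foldl, hstep, dedupFrom]
      exact ih b x
    · have hne : toI t ≠ toI b := by cases b <;> cases t <;> simp_all [toI]
      have hstep : bOutStep (x ++ [toI t]) (toI b) = (x ++ [toI t]) ++ [toI b] := by
        simp [bOutStep, hlast, hne]
      simp only [List.map, List.foldl, hstep, dedupFrom, if_neg hb]
      rw [ih b (x ++ [toI t])]
      simp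
  
theorem bout_init (bs : List Bool) :
    (bs.map toI).foldl bOutStep [] = (dedupInit bs).map toI := by
  cases bs with
  | nil => rfl
  | cons b r =>
    have hstep : bOutStep [] (toI b) = [] ++ [toI b] := by simp [bOutStep]
    simp only [List.map, List.foldl, hstep, dedupInit]
    rw [bout_from r b []]
    simp

-- ===== VERDICT (by name: the statement is the Claim_ definition above) =====
theorem CreateFlag_spec : Claim_equal_CreateFlag := by
  intro dataIn _
  unfold Spec_CreateFlag CreateFlag CreateFlag_alt
  rw [aloop_init dataIn _ false []]
  have hb := bpar_loop dataIn (PySem.List.pyRange 0 ((dataIn.length : Int) - 1) 1) false []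
  simp only [toI, Bool.false_eq_true, if_false] at hb
  rw [hb]
  simp only [List.nil_append]
  rw [bout_init]
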